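-- pv_equiv track=rewrite | github.com/towfeeqfayaz11/ninja-dsa | milestone1/03_recursion_assignment/CheckAB.py | check_AB
-- ===== SOURCE A (Python) =====
-- def check_AB(s):
--     if  s == "abb" or s == "a":
--         return True
--
--     if s[0] == 'a':
--         if s[:3] == "abb":
--             return check_AB(s[3:])
--         else:
--             return check_AB(s[1:])
--     else:
--         return False
-- ===== SOURCE B (Python) =====
-- def check_AB(s):
--     # DFA for (a(bb)?)* : 0 = block boundary, 1 = after 'a', 2 = after 'ab', 3 = dead
--     state = 0
--     for c in s:
--         if state == 0 and c == 'a':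
--             state = 1
--         elif state == 1 and c == 'a':
--             state = 1
--         elif state == 1 and c == 'b':
--             state = 2
--         elif state == 2 and c == 'b':
--             state = 0
--         else:
--             state = 3
--     return state <= 1
-- ===== Notes on version B (the rewrite author's own statement) =====
-- stated objective: alternative
-- what changed: Replaces A's recursion with repeated string slicing (s[:3]/s[3:]/s[1:] copy the string each step) by a single character-by-character pass through a 4-state DFA for the block language, with no slicing, lookahead or recursion; B trades A's early exit on an invalid first character for a full scan without quadratic slice copies or recursion-depth limits.
import Mathlib
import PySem

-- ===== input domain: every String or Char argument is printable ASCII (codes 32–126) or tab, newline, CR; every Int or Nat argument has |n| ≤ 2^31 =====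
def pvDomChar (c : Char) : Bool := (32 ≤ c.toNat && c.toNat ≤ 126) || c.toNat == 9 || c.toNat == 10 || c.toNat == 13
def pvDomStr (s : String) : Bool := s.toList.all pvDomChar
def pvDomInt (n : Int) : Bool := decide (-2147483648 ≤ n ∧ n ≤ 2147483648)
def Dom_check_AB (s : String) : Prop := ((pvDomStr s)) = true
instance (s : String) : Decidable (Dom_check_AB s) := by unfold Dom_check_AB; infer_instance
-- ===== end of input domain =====

-- B replaces A's slice-copying recursion by a single character-by-character DFA pass.

-- ===== PORT A =====
-- A's recursion on the character list; slices with nonnegative bounds are List.take/List.drop.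
-- The [] case is Python's IndexError at s[0] (excluded by Pre_check_AB); the port returns false there.
def check_AB_core : List Char → Bool
  | [] => false
  | c :: rest =>
      if c :: rest = ['a','b','b'] ∨ c :: rest = ['a'] then true
      else if c = 'a' then
        if (c :: rest).take 3 = ['a','b','b'] then check_AB_core ((c :: rest).drop 3)
        else check_AB_core rest
      else false
termination_by cs => cs.length
decreasing_by
  · simp
  · simp

def check_AB (s : String) : Bool := check_AB_core s.toList

-- ===== PORT B =====
-- B's DFA transition: 0 = block boundary, 1 = after 'a', 2 = after 'ab', 3 = dead.
def abStep (st : Int) (c : Char) : Int :=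
  if st = 0 ∧ c = 'a' then 1
  else if st = 1 ∧ c = 'a' then 1
  else if st = 1 ∧ c = 'b' then 2
  else if st = 2 ∧ c = 'b' then 0
  else 3

def check_AB_alt (s : String) : Bool := decide (s.toList.foldl abStep 0 ≤ 1)

-- ===== PRECONDITION & SPEC =====
-- Pre_ excludes only the empty string, on which A raises IndexError at s[0].
def Pre_check_AB (s : String) : Prop := s ≠ ""
instance (s : String) : Decidable (Pre_check_AB s) := by unfold Pre_check_AB; infer_instance
def pvWitness_check_AB : String := "abb"

def Spec_check_AB (s : String) (out : Bool) : Prop := out = check_AB_alt s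
instance (s : String) (out : Bool) : Decidable (Spec_check_AB s out) := by unfold Spec_check_AB; infer_instance

-- ===== CLAIM (what is proved, stated in full; the proofs are below) =====
def Claim_equal_check_AB : Prop := ∀ (s : String), Dom_check_AB s → Pre_check_AB s → Spec_check_AB s (check_AB s)

-- ===== LEMMAS AND PROOFS =====

-- The dead state 3 is absorbing.
theorem abStep_dead : ∀ (cs : List Char), cs.foldl abStep 3 = 3 := by
  intro cs
  induction cs with
  | nil => rfl
  | cons c rest ih => simpa [abStep] using ih

-- When the tail does not start with "bb", starting the fold at state 1 and at state 0
-- yields the same acceptance verdict.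
theorem fold_one_eq_zero : ∀ (rest : List Char), rest.take 2 ≠ ['b','b'] →
    (decide (rest.foldl abStep 1 ≤ 1) = decide (rest.foldl abStep 0 ≤ 1)) := by
  intro rest h
  cases rest with
  | nil => decide
  | cons c t =>
    by_cases hc : c = 'a'
    · subst hc; simp [abStep]
    · by_cases hb : c = 'b'
      · subst hb
        cases t with
        | nil => simp [abStep]
        | cons d t' =>
          have hd : d ≠ 'b' := by
            intro h0; exact h (by simp [h0])
          simp [abStep, hc, hd, abStep_dead]
      · simp [abStep, hc, hb, abStep_dead]

-- A and B agree on every nonempty character list (induction on a length bound).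
theorem core_eq_alt : ∀ (n : Nat) (cs : List Char), cs.length ≤ n → cs ≠ [] →
    check_AB_core cs = decide (cs.foldl abStep 0 ≤ 1) := by
  intro n
  induction n with
  | zero =>
      intro cs hlen hne
      cases cs with
      | nil => exact absurd rfl hne
      | cons c r => simp at hlen
  | succ n ih =>
      intro cs hlen hne
      cases cs with
      | nil => exact absurd rfl hne
      | cons c rest =>
        by_cases hbase : c :: rest = ['a','b','b'] ∨ c :: rest = ['a']
        · rcases hbase with h1 | h1 <;> rw [h1] <;> simp [check_AB_core, abStep]
        · by_cases hc : c = 'a'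
          · subst hc
            by_cases ht : ('a' :: rest).take 3 = ['a','b','b']
            · -- rest begins with 'b','b'
              have hshape : rest = 'b' :: 'b' :: rest.drop 2 := by
                cases rest with
                | nil => simp at ht
                | cons c2 r2 =>
                  cases r2 with
                  | nil => simp at ht
                  | cons c3 r3 =>
                    simp at ht
                    simp [ht.1, ht.2]
              have hne3 : rest.drop 2 ≠ [] := by
                intro h0
                apply hbase
                left
                rw [hshape, h0]
              have hlen3 : (rest.drop 2).length ≤ n := by
                simp at hlen ⊢; omega
              rw [check_AB_core]
              simp only [if_neg hbase, if_pos ht, List.drop]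
              rw [hshape]
              have := ih (rest.drop 2) hlen3 hne3
              simpa [abStep] using this
            · have hne1 : rest ≠ [] := by
                intro h0; exact hbase (Or.inr (by rw [h0]))
              have hlen1 : rest.length ≤ n := by simp at hlen; omega
              have htake : rest.take 2 ≠ ['b','b'] := by
                intro h0
                apply ht
                cases rest with
                | nil => simp at h0
                | cons c2 r2 =>
                  cases r2 with
                  | nil => simp at h0
                  | cons c3 r3 =>
                    simp at h0
                    simp [h0.1, h0.2]
              rw [check_AB_core]
              simp only [if_neg hbase, if_neg ht]
              rw [ih rest hlen1 hne1]
              have := fold_one_eq_zero rest htake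
              simpa [abStep] using this.symm
          · rw [check_AB_core]
            simp [hc, abStep, abStep_dead]

-- ===== VERDICT =====
theorem check_AB_spec : Claim_equal_check_AB := by
  intro s _ hpre
  unfold Spec_check_AB check_AB check_AB_alt
  apply core_eq_alt s.toList.length _ le_rfl
  intro h
  apply hpre
  cases s
  simp_all
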